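-- pv_equiv track=rewrite | github.com/paul-thomson/adventofcode2019 | 4/main.py | digit_adjacency
-- ===== SOURCE A (Python) =====
-- def digit_adjacency(password, additional):
--     any_digit_adjacency = False
--     str_password = str(password)
--     for i, letter in enumerate(str_password):
--         # is letter the same as previous letter
--         if i > 0:
--             previous_letter = str_password[i - 1]
--             if letter == previous_letter:
--                 if additional:
--                     if i > 1:
--                         if letter == str_password[i - 2]:
--                             continue
--                     if i < len(str_password) - 1:
--                         if letter == str_password[i + 1]:
--                             continue
--                 any_digit_adjacency = True
--     return any_digit_adjacency
-- ===== SOURCE B (Python) =====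
-- def digit_adjacency(password, additional):
--     s = str(password)
--     # stage 1: run-length encode the string (maximal runs of equal chars)
--     runs = []
--     i = 0
--     while i < len(s):
--         j = i
--         while j < len(s) and s[j] == s[i]:
--             j += 1
--         runs.append(j - i)
--         i = j
--     # stage 2: a qualifying adjacency is a run of exactly 2 (strict mode) / at least 2
--     if additional:
--         return 2 in runs
--     return any(n >= 2 for n in runs)
-- ===== Notes on version B (the rewrite author's own statement) =====
-- stated objective: alternative
-- what changed: Replaces A's single index-based scan with lookbehind/lookahead and continue-statements by a staged algorithm: first run-length encode the string into its maximal runs of equal characters, then test the run lengths (a run of exactly 2 when additional, at least 2 otherwise).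
import Mathlib
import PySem

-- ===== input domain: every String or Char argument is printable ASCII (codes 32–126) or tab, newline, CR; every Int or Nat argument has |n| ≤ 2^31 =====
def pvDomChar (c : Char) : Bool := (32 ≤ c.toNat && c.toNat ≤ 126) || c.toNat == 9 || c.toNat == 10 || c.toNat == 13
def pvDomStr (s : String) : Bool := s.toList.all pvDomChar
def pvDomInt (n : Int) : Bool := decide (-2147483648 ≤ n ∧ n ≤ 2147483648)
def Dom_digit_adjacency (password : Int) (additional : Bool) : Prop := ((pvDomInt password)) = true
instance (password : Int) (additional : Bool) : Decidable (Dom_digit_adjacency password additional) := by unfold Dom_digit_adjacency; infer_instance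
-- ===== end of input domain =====

-- B replaces A's single index-based lookbehind/lookahead scan by a staged algorithm:
-- first run-length encode the string into its maximal runs, then test the run lengths
-- (exactly 2 when additional, at least 2 otherwise) (objective: alternative; same cost).

-- ===== PORT A =====
-- literal transliteration of A: enumerate loop, Python indexing via pyGetD
-- (every index A reads is in range, so the default is never used)
def digit_adjacency (password : Int) (additional : Bool) : Bool :=
  let sp := (PySem.Int.toStr password).toList
  (PySem.List.enumerate sp 0).foldl
    (fun acc p =>
      let i := p.1
      let letter := p.2
      if i > 0 then
        let previous := PySem.List.pyGetD sp (i - 1) ' '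
        if letter == previous then
          -- `continue` of the two inner checks folded into one skip condition
          if additional &&
              ((decide (i > 1) && (letter == PySem.List.pyGetD sp (i - 2) ' ')) ||
               (decide (i < (sp.length : Int) - 1) && (letter == PySem.List.pyGetD sp (i + 1) ' '))) then
            acc
          else
            true
        else acc
      else acc)
    false

-- ===== PORT B =====
-- Source B's stage 1: the outer while collects maximal runs; its inner while (count the
-- chars equal to s[i], continue after them) is the takeWhile/dropWhile split.
def pvRuns : List Char → List Nat
  | [] => []
  | c :: t =>
    (1 + (t.takeWhile (fun d => d == c)).length) :: pvRuns (t.dropWhile (fun d => d == c))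
  termination_by s => s.length
  decreasing_by
    have := List.length_dropWhile_le (fun d => d == c) t
    simp only [List.length_cons]; omega

-- Source B's stage 2: `2 in runs` / `any(n >= 2 for n in runs)`
def digit_adjacency_alt (password : Int) (additional : Bool) : Bool :=
  let runs := pvRuns (PySem.Int.toStr password).toList
  if additional then runs.contains 2 else runs.any (fun n => decide (2 ≤ n))

-- ===== PRECONDITION & SPEC =====
def Spec_digit_adjacency (password : Int) (additional : Bool) (out : Bool) : Prop := out = digit_adjacency_alt password additional
instance (password : Int) (additional : Bool) (out : Bool) : Decidable (Spec_digit_adjacency password additional out) := by unfold Spec_digit_adjacency; infer_instance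

-- ===== CLAIM (what is proved, stated in full; the proofs are below) =====
def Claim_equal_digit_adjacency : Prop := ∀ (password : Int) (additional : Bool), Dom_digit_adjacency password additional → Spec_digit_adjacency password additional (digit_adjacency password additional)

-- ===== LEMMAS AND PROOFS =====

theorem getElem_idx_congr {α : Type} (l : List α) {i j : Nat} (h : i = j) (hi : i < l.length) :
    l[i]'hi = l[j]'(h ▸ hi) := by subst h; rfl

-- the per-element test of A's loop, as a pure predicate on an (index, char) pair
def gA (sp : List Char) (additional : Bool) (p : Int × Char) : Bool :=
  decide (p.1 > 0) && (p.2 == PySem.List.pyGetD sp (p.1 - 1) ' ') &&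
  !(additional &&
      ((decide (p.1 > 1) && (p.2 == PySem.List.pyGetD sp (p.1 - 2) ' ')) ||
       (decide (p.1 < (sp.length : Int) - 1) && (p.2 == PySem.List.pyGetD sp (p.1 + 1) ' '))))

theorem foldl_or_any {α : Type} (g : α → Bool) :
    ∀ (l : List α) (b : Bool), l.foldl (fun acc x => acc || g x) b = (b || l.any g) := by
  intro l
  induction l with
  | nil => simp
  | cons x t ih => intro b; simp [List.foldl, ih, Bool.or_assoc]

theorem stepA_eq (sp : List Char) (additional : Bool) :
    (fun (acc : Bool) (p : Int × Char) =>
      let i := p.1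
      let letter := p.2
      if i > 0 then
        let previous := PySem.List.pyGetD sp (i - 1) ' '
        if letter == previous then
          if additional &&
              ((decide (i > 1) && (letter == PySem.List.pyGetD sp (i - 2) ' ')) ||
               (decide (i < (sp.length : Int) - 1) && (letter == PySem.List.pyGetD sp (i + 1) ' '))) then
            acc
          else
            true
        else acc
      else acc)
    = (fun acc p => acc || gA sp additional p) := by
  funext acc p
  cases acc
  · simp only [gA]
    split_ifs with h1 h2 h3
    · simp only [h3, Bool.not_true, Bool.and_false, Bool.or_false]
    · simp [h1, h2, Bool.eq_false_iff.mpr h3]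
    · simp [Bool.eq_false_iff.mpr h2]
    · simp [h1]
  · dsimp only
    split_ifs <;> rfl

theorem digit_adjacency_eq_any (password : Int) (additional : Bool) :
    digit_adjacency password additional
      = (PySem.List.enumerate ((PySem.Int.toStr password).toList) 0).any
          (gA ((PySem.Int.toStr password).toList) additional) := by
  unfold digit_adjacency
  exact (congrArg
      (fun f => List.foldl f false (PySem.List.enumerate ((PySem.Int.toStr password).toList) 0))
      (stepA_eq ((PySem.Int.toStr password).toList) additional)).trans
    (by rw [foldl_or_any]; simp)

-- membership in `enumerate` ↔ an index into the list
theorem any_enumerate_iff (sp : List Char) (g : Int × Char → Bool) :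
    (PySem.List.enumerate sp 0).any g = true ↔
      ∃ (k : Nat), ∃ (h : k < sp.length), g ((k : Int), sp[k]) = true := by
  rw [List.any_eq_true]
  constructor
  · rintro ⟨p, hp, hg⟩
    rcases (PySem.List.mem_enumerate_iff _ _ _).1 hp with ⟨k, hk, rfl⟩
    exact ⟨k, hk, by simpa using hg⟩
  · rintro ⟨k, hk, hg⟩
    exact ⟨((k : Int), sp[k]), (PySem.List.mem_enumerate_iff _ _ _).2 ⟨k, hk, by simp⟩, hg⟩

-- A's test at a valid index, in terms of total getD lookups
theorem gA_eval (sp : List Char) (additional : Bool) (k : Nat) (hk : k < sp.length) :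
    gA sp additional ((k : Int), sp[k]) = true ↔
      (0 < k ∧ sp.getD k ' ' = sp.getD (k-1) ' ' ∧
        ¬(additional = true ∧
          ((1 < k ∧ sp.getD k ' ' = sp.getD (k-2) ' ') ∨
           (k < sp.length - 1 ∧ sp.getD k ' ' = sp.getD (k+1) ' ')))) := by
  unfold gA
  have hsp : sp[k] = sp.getD k ' ' := (List.getD_eq_getElem _ _ hk).symm
  by_cases h0 : 0 < k
  · have e1 : PySem.List.pyGetD sp ((k:Int) - 1) ' ' = sp.getD (k-1) ' ' := by
      rw [show ((k:Int) - 1) = ((k-1 : Nat) : Int) by omega, PySem.List.pyGetD_natCast]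
    have d0 : ((0:Int) < (k:Int)) := by omega
    by_cases h2 : 1 < k
    · have e2 : PySem.List.pyGetD sp ((k:Int) - 2) ' ' = sp.getD (k-2) ' ' := by
        rw [show ((k:Int) - 2) = ((k-2 : Nat) : Int) by omega, PySem.List.pyGetD_natCast]
      have d2 : ((1:Int) < (k:Int)) := by omega
      by_cases h3 : k < sp.length - 1
      · have e3 : PySem.List.pyGetD sp ((k:Int) + 1) ' ' = sp.getD (k+1) ' ' := by
          rw [show ((k:Int) + 1) = ((k+1 : Nat) : Int) by omega, PySem.List.pyGetD_natCast]
        have d3 : ((k:Int) < (sp.length:Int) - 1) := by omega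
        simp [hsp, e1, e2, e3, d2, d3, h0, h2, h3]
        intro _
        cases additional <;> simp
      · have d3 : ¬((k:Int) < (sp.length:Int) - 1) := by omega
        simp [hsp, e1, e2, d2, d3, h0, h2, h3]
        intro _
        cases additional <;> simp
    · have d2 : ¬((1:Int) < (k:Int)) := by omega
      by_cases h3 : k < sp.length - 1
      · have e3 : PySem.List.pyGetD sp ((k:Int) + 1) ' ' = sp.getD (k+1) ' ' := by
          rw [show ((k:Int) + 1) = ((k+1 : Nat) : Int) by omega, PySem.List.pyGetD_natCast]
        have d3 : ((k:Int) < (sp.length:Int) - 1) := by omega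
        simp [hsp, e1, e3, d2, d3, h0, h2, h3]
        intro _
        cases additional <;> simp
      · have d3 : ¬((k:Int) < (sp.length:Int) - 1) := by omega
        simp [hsp, e1, d2, d3, h0, h2, h3]
  · have d0 : ¬((0:Int) < (k:Int)) := by omega
    simp [h0]

-- elementwise description of B's padded window list
theorem before_getElem (s : List Char) (j : Nat) (hj : j < s.length) :
    (none :: s.map some)[j]'(by simp; omega)
      = if h : 0 < j then some (s[j-1]'(by omega)) else none := by
  cases j with
  | zero => simp
  | succ m => simp

theorem after_getElem (s : List Char) (j : Nat) (hj : j + 1 < s.length) :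
    ((s.drop 2).map some ++ [none])[j]'(by simp; omega)
      = if h : j + 2 < s.length then some (s[j+2]'h) else none := by
  by_cases h : j + 2 < s.length
  · rw [List.getElem_append_left (by simp; omega)]
    simp [h]
    exact getElem_idx_congr _ (by omega) _
  · have hj2 : j = s.length - 2 := by omega
    have hlen : ((s.drop 2).map some).length = s.length - 2 := by simp
    rw [List.getElem_append_right (by simp; omega)]
    simp [hj2]
    omega

-- the index-based scan of A, re-expressed as a single listwise pass over padded windows
theorem core (s : List Char) (additional : Bool) :
    (PySem.List.enumerate s 0).any (gA s additional)
      = (if !additional then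
          (s.zip (PySem.List.slice s (some 1) none)).any (fun p => p.1 == p.2)
        else
          (((none :: s.map some)).zip (s.zip ((PySem.List.slice s (some 1) none).zip ((PySem.List.slice s (some 2) none).map some ++ [none])))).any
            (fun q => (q.2.2.1 == q.2.1) && !(q.1 == some q.2.1) && !(some q.2.2.1 == q.2.2.2))) := by
  have hsl1 : PySem.List.slice s (some 1) none = s.tail := PySem.List.slice_from_one s
  have hsl2 : PySem.List.slice s (some 2) none = s.drop 2 := by
    rw [show ((2:Int)) = ((2:Nat) : Int) by norm_num, PySem.List.slice_from_natCast]
  have hgd : ∀ (k : Nat) (h : k < s.length), s.getD k ' ' = s[k]'h := by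
    intro k h; exact List.getD_eq_getElem _ _ h
  cases additional with
  | false =>
    rw [Bool.eq_iff_iff, any_enumerate_iff, if_pos (show (!false) = true from rfl), hsl1,
      List.any_eq_true]
    constructor
    · rintro ⟨k, hk, hg⟩
      rw [gA_eval s false k hk] at hg
      obtain ⟨h0, he, -⟩ := hg
      have hk1 : k - 1 < (s.zip s.tail).length := by
        simp [List.length_zip, List.length_tail]; omega
      refine ⟨(s.zip s.tail)[k-1], List.getElem_mem _, ?_⟩
      rw [List.getElem_zip]
      have ht : s.tail[k-1]'(by simp [List.length_tail]; omega) = s[k]'hk := by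
        rw [List.getElem_tail]; exact getElem_idx_congr _ (by omega) _
      rw [hgd k hk, hgd (k-1) (by omega)] at he
      simp [ht]
      exact he.symm
    · rintro ⟨p, hp, he⟩
      rcases List.mem_iff_getElem.1 hp with ⟨j, hj, rfl⟩
      have hjlen : j + 1 < s.length := by
        simp [List.length_zip, List.length_tail] at hj; omega
      refine ⟨j + 1, hjlen, ?_⟩
      rw [gA_eval s false (j+1) hjlen]
      rw [List.getElem_zip] at he
      simp at he
      have ht : s.tail[j]'(by simp [List.length_tail]; omega) = s[j+1]'hjlen := by
        rw [List.getElem_tail]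
      refine ⟨by omega, ?_, by simp⟩
      rw [show j + 1 - 1 = j by omega, hgd (j+1) hjlen, hgd j (by omega)]
      exact he.symm
  | true =>
    rw [Bool.eq_iff_iff, any_enumerate_iff, if_neg (show ¬ (!true) = true from by simp), hsl1,
      hsl2, List.any_eq_true]
    constructor
    · rintro ⟨k, hk, hg⟩
      rw [gA_eval s true k hk] at hg
      obtain ⟨h0, he, hn⟩ := hg
      have hj : k - 1 < ((none :: s.map some).zip (s.zip (s.tail.zip ((s.drop 2).map some ++ [none])))).length := by
        simp [List.length_zip, List.length_tail]; omega
      refine ⟨_, List.getElem_mem hj, ?_⟩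
      rw [List.getElem_zip, List.getElem_zip, List.getElem_zip]
      have hkl : k - 1 + 1 < s.length := by omega
      have hb := before_getElem s (k-1) (by omega)
      have ha := after_getElem s (k-1) hkl
      have ht : s.tail[k-1]'(by simp [List.length_tail]; omega) = s[k]'hk := by
        rw [List.getElem_tail]; exact getElem_idx_congr _ (by omega) _
      rw [hgd k hk, hgd (k-1) (by omega)] at he
      simp only [hb, ha, ht]
      simp only [Bool.and_eq_true, beq_iff_eq, Bool.not_eq_true', beq_eq_false_iff_ne, ne_eq]
      refine ⟨⟨he, ?_⟩, ?_⟩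
      · by_cases h1 : 0 < k - 1
        · simp only [dif_pos h1]
          intro hc
          injection hc with hc
          apply hn
          refine ⟨rfl, Or.inl ⟨by omega, ?_⟩⟩
          rw [hgd k hk, hgd (k-2) (by omega)]
          have e1 : s[k-1-1]'(by omega) = s[k-2]'(by omega) := getElem_idx_congr _ (by omega) _
          rw [← e1, hc]
          exact he
        · simp
          intro hx
          exact absurd hx (by omega)
      · by_cases h2 : k - 1 + 2 < s.length
        · simp only [dif_pos h2]
          intro hc
          injection hc with hc
          apply hn
          refine ⟨rfl, Or.inr ⟨by omega, ?_⟩⟩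
          rw [hgd k hk, hgd (k+1) (by omega)]
          have e1 : s[k-1+2]'h2 = s[k+1]'(by omega) := getElem_idx_congr _ (by omega) _
          rw [e1] at hc
          exact hc
        · simp [dif_neg h2]
    · rintro ⟨q, hq, hcond⟩
      rcases List.mem_iff_getElem.1 hq with ⟨j, hj, rfl⟩
      have hjl : j + 1 < s.length := by
        simp [List.length_zip, List.length_tail] at hj; omega
      rw [List.getElem_zip, List.getElem_zip, List.getElem_zip] at hcond
      have hb := before_getElem s j (by omega)
      have ha := after_getElem s j hjl
      have ht : s.tail[j]'(by simp [List.length_tail]; omega) = s[j+1]'hjl := by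
        rw [List.getElem_tail]
      simp only [hb, ha, ht, Bool.and_eq_true, beq_iff_eq, Bool.not_eq_true', beq_eq_false_iff_ne, ne_eq] at hcond
      obtain ⟨⟨he, hna⟩, hnd⟩ := hcond
      refine ⟨j + 1, hjl, ?_⟩
      rw [gA_eval s true (j+1) hjl]
      refine ⟨by omega, ?_, ?_⟩
      · rw [show j + 1 - 1 = j by omega, hgd (j+1) hjl, hgd j (by omega)]
        exact he
      rintro ⟨-, (⟨h1, hb2⟩ | ⟨h3, hb3⟩)⟩
      · apply hna
        by_cases h0 : 0 < j
        · simp only [dif_pos h0]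
          congr 1
          rw [hgd (j+1) hjl, hgd (j+1-2) (by omega)] at hb2
          have e1 : s[j+1-2]'(by omega) = s[j-1]'(by omega) := getElem_idx_congr _ (by omega) _
          rw [e1] at hb2
          rw [← hb2, he]
        · omega
      · apply hnd
        have h2 : j + 2 < s.length := by omega
        simp only [dif_pos h2]
        congr 1
        rw [hgd (j+1) hjl, hgd (j+1+1) (by omega)] at hb3
        have e1 : s[j+1+1]'(by omega) = s[j+2]'h2 := getElem_idx_congr _ (by omega) _
        rw [e1] at hb3
        exact hb3

-- ---- bridging the windowed pass to run lengths ----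

-- recursive form of the windowed pass (with the previous character as context)
def gW : Option Char → List Char → Bool
  | _, [] => false
  | _, [_] => false
  | pb, b :: c :: t =>
    ((c == b) && !(pb == some b) && !(some c == t.head?)) || gW (some b) (c :: t)

-- run scanner: current run has char c and length n
def fRun (c : Char) (n : Nat) : List Char → Bool
  | [] => n == 2
  | d :: t => if d == c then fRun c (n+1) t else (n == 2) || fRun d 1 t

-- skip the rest of a (already too long) run of char c, then scan
def fSkip (c : Char) : List Char → Bool
  | [] => false
  | d :: t => if d == c then fSkip c t else fRun d 1 t

theorem zip_to_g : ∀ (s : List Char) (pb : Option Char),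
    ((pb :: s.map some).zip (s.zip (s.tail.zip ((s.drop 2).map some ++ [none])))).any
      (fun q => (q.2.2.1 == q.2.1) && !(q.1 == some q.2.1) && !(some q.2.2.1 == q.2.2.2))
      = gW pb s := by
  intro s
  induction s with
  | nil => intro pb; rfl
  | cons b t ih =>
    intro pb
    cases t with
    | nil => rfl
    | cons c u =>
      have hpad : (c::u).zip (u.map some ++ [none])
          = (c, u.head?) :: u.zip (u.tail.map some ++ [none]) := by
        cases u <;> simp
      rw [show gW pb (b::c::u)
            = (((c == b) && !(pb == some b) && !(some c == u.head?)) || gW (some b) (c :: u))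
            from rfl,
          ← ih (some b)]
      simp only [List.map_cons, List.tail_cons, show List.drop 2 (b::c::u) = u from rfl,
        show List.drop 2 (c::u) = u.tail from (by cases u <;> rfl), hpad,
        List.zip_cons_cons, List.any_cons]

theorem fRun_ge3 : ∀ (t : List Char) (c : Char) (n : Nat), 3 ≤ n → fRun c n t = fSkip c t := by
  intro t
  induction t with
  | nil => intro c n h; simp [fRun, fSkip]; omega
  | cons d u ih =>
    intro c n h
    by_cases hd : (d == c) = true
    · simp only [fRun, fSkip, hd, if_pos]
      exact ih c (n+1) (by omega)
    · simp [fRun, fSkip, hd, show (n == 2) = false by simp; omega]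

theorem fRun_two : ∀ (t : List Char) (c : Char),
    fRun c 2 t = (!(some c == t.head?) || fSkip c t) := by
  intro t
  induction t with
  | nil => intro c; simp [fRun, fSkip]
  | cons d u ih =>
    intro c
    cases hd : (d == c) with
    | true =>
      have hcd : c = d := (beq_iff_eq.1 hd).symm
      subst hcd
      simp [fRun, fSkip, fRun_ge3 u c 3 (by omega)]
    | false =>
      have hcd : ¬ c = d := fun h => by simp [h] at hd
      simp [fRun, fSkip, hd, hcd]

theorem gW_cons : ∀ (t : List Char) (c : Char) (pb : Option Char),
    gW pb (c :: t) = if pb == some c then fSkip c t else fRun c 1 t := by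
  intro t
  induction t with
  | nil =>
    intro c pb
    simp [gW, fSkip, fRun]
  | cons d u ih =>
    intro c pb
    rw [show gW pb (c::d::u)
          = (((d == c) && !(pb == some c) && !(some d == u.head?)) || gW (some c) (d :: u))
          from rfl,
        ih d (some c)]
    have hbeq : ((some c : Option Char) == some d) = (c == d) := rfl
    cases hpb : (pb == some c) with
    | true =>
      simp only [Bool.not_true, Bool.and_false, Bool.false_and, Bool.false_or, if_pos]
      rw [hbeq]
      cases hcd : (c == d) with
      | true =>
        have : c = d := beq_iff_eq.1 hcd
        subst this
        simp [fSkip]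
      | false =>
        have hdc : (d == c) = false := by
          simp only [beq_eq_false_iff_ne, ne_eq] at hcd ⊢
          exact fun h => hcd h.symm
        simp [fSkip, hdc]
    | false =>
      simp only [Bool.not_false, Bool.and_true, Bool.false_eq_true, if_false]
      rw [hbeq]
      cases hdc : (d == c) with
      | true =>
        have : d = c := beq_iff_eq.1 hdc
        subst this
        simp [fRun, fRun_two]
      | false =>
        have hcd : (c == d) = false := by
          simp only [beq_eq_false_iff_ne, ne_eq] at hdc ⊢
          exact fun h => hdc h.symm
        simp [fRun, hdc, hcd]

theorem natBeq_comm (a b : Nat) : (a == b) = (b == a) := by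
  rw [Bool.eq_iff_iff]
  simp only [beq_iff_eq]
  exact eq_comm

theorem fRun_runs : ∀ (t : List Char) (c : Char) (n : Nat),
    fRun c n t = (((n + (t.takeWhile (fun d => d == c)).length) == 2)
                  || (pvRuns (t.dropWhile (fun d => d == c))).contains 2) := by
  intro t
  induction t with
  | nil => intro c n; simp [fRun, pvRuns]
  | cons d u ih =>
    intro c n
    cases hd : (d == c) with
    | true =>
      have htw : (d::u).takeWhile (fun e => e == c) = d :: u.takeWhile (fun e => e == c) := by
        simp [hd]
      have hdw : (d::u).dropWhile (fun e => e == c) = u.dropWhile (fun e => e == c) := by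
        simp [hd]
      rw [show fRun c n (d::u)
            = (if d == c then fRun c (n+1) u else ((n == 2) || fRun d 1 u)) from rfl,
          if_pos hd, ih c (n+1), htw, hdw, List.length_cons,
          show n + 1 + (u.takeWhile (fun e => e == c)).length
             = n + ((u.takeWhile (fun e => e == c)).length + 1) by omega]
    | false =>
      have htw : (d::u).takeWhile (fun e => e == c) = [] := by
        simp [hd]
      have hdw : (d::u).dropWhile (fun e => e == c) = d :: u := by
        simp [hd]
      rw [show fRun c n (d::u)
            = (if d == c then fRun c (n+1) u else ((n == 2) || fRun d 1 u)) from rfl,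
          if_neg (by simp [hd]), ih d 1, htw, hdw,
          show pvRuns (d :: u)
              = (1 + (u.takeWhile (fun e => e == d)).length)
                :: pvRuns (u.dropWhile (fun e => e == d)) from by rw [pvRuns]]
      simp only [List.length_nil, Nat.add_zero, List.contains_cons]
      rw [natBeq_comm 2 (1 + (u.takeWhile (fun e => e == d)).length)]

-- the whole additional=true chain, over an arbitrary character list
theorem windows_eq_runs_two (s : List Char) :
    gW none s = (pvRuns s).contains 2 := by
  cases s with
  | nil => simp [gW, pvRuns]
  | cons c t =>
    rw [gW_cons t c none,
      if_neg (show ¬ ((((none : Option Char) == some c)) = true) from by simp),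
      fRun_runs t c 1,
      show pvRuns (c :: t)
          = (1 + (t.takeWhile (fun e => e == c)).length)
            :: pvRuns (t.dropWhile (fun e => e == c)) from by rw [pvRuns]]
    simp only [List.contains_cons]
    rw [natBeq_comm 2 (1 + (t.takeWhile (fun e => e == c)).length)]

-- the additional=false chain: an adjacent equal pair ↔ a run of length ≥ 2
theorem pairs_eq_runs_ge2 : ∀ (s : List Char),
    (s.zip s.tail).any (fun p => p.1 == p.2) = (pvRuns s).any (fun n => decide (2 ≤ n)) := by
  intro s
  induction s with
  | nil => simp [pvRuns]
  | cons c t ih =>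
    cases t with
    | nil => simp [pvRuns]
    | cons d u =>
      rw [show pvRuns (c :: d :: u)
            = (1 + ((d::u).takeWhile (fun e => e == c)).length)
              :: pvRuns ((d::u).dropWhile (fun e => e == c)) from by rw [pvRuns]]
      cases hd : (d == c) with
      | true =>
        have hcd : c = d := (beq_iff_eq.1 hd).symm
        simp only [List.takeWhile_cons, hd, if_pos, List.length_cons, List.tail_cons,
          List.zip_cons_cons, List.any_cons, List.any_cons]
        rw [Bool.eq_iff_iff]
        simp [hcd]
        exact Or.inl (by omega)
      | false =>
        have hcd : (c == d) = false := by
          apply beq_eq_false_iff_ne.2; intro h; exact absurd (beq_iff_eq.2 h.symm) (by simp [hd])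
        simp only [List.takeWhile_cons, List.dropWhile_cons, hd, Bool.false_eq_true, ite_false,
          List.length_nil, Nat.add_zero, List.tail_cons, List.zip_cons_cons, List.any_cons, hcd]
        simp only [List.tail_cons] at ih
        rw [ih]
        simp

-- ===== VERDICT (by name: the statement is the Claim_ definition above) =====
theorem digit_adjacency_spec : Claim_equal_digit_adjacency := by
  intro password additional _
  unfold Spec_digit_adjacency digit_adjacency_alt
  rw [digit_adjacency_eq_any, core]
  have hsl1 : PySem.List.slice ((PySem.Int.toStr password).toList) (some 1) none
      = ((PySem.Int.toStr password).toList).tail := PySem.List.slice_from_one _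
  have hsl2 : PySem.List.slice ((PySem.Int.toStr password).toList) (some 2) none
      = ((PySem.Int.toStr password).toList).drop 2 := by
    rw [show ((2:Int)) = ((2:Nat) : Int) by norm_num, PySem.List.slice_from_natCast]
  cases additional with
  | false =>
    rw [if_pos (show ((!false) = true) from rfl), hsl1]
    exact pairs_eq_runs_ge2 _
  | true =>
    rw [if_neg (show ¬ ((!true) = true) from by simp), hsl1, hsl2, zip_to_g, windows_eq_runs_two]
    rfl
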